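-- pv_equiv track=rewrite | github.com/bathonSpidey/NumberToWordSequencer | NumberToWordSequencer.py | SlideTwoAtATime
-- ===== SOURCE A (Python) =====
-- def SlideTwoAtATime(sequence, generatedList):
--     for i in range(len(sequence)-1):
--         if i ==0:
--             firstHalf=chr(int(sequence[i:i+2])+96)
--             firstHalf+=IndividualCharacterCombination(sequence[2:])
--             generatedList.append(firstHalf)
--         elif i==len(sequence)-2:
--             lastHalf=IndividualCharacterCombination(sequence[:i])
--             lastHalf+=chr(int(sequence[i:i+2])+96)
--             generatedList.append(lastHalf)
--         else:
--             firstSequence=IndividualCharacterCombination(sequence[:i])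
--             firstSequence+=chr(int(sequence[i:i+2])+96)
--             firstSequence+=IndividualCharacterCombination(sequence[i+2:])
--             generatedList.append(firstSequence)
--     return generatedList
--
-- def IndividualCharacterCombination(sequence):
--     word=""
--     for i in sequence:
--         word+=chr(int(i)+96)
--     return word
-- ===== SOURCE B (Python) =====
-- def SlideTwoAtATime(sequence, generatedList):
--     if len(sequence) < 2:
--         return generatedList
--     full = ''.join(chr(int(c) + 96) for c in sequence)
--     for i in range(len(sequence) - 1):
--         generatedList.append(full[:i] + chr(int(sequence[i:i+2]) + 96) + full[i+2:])
--     return generatedList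
-- ===== Notes on version B (the rewrite author's own statement) =====
-- stated objective: simpler
-- what changed: B converts the whole sequence to its letter string once and builds every output by slicing that precomputed table around the pair character, replacing A's three-way i==0/i==last/else branching and its per-iteration re-conversion of prefixes and suffixes with one uniform slice expression.
import Mathlib
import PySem

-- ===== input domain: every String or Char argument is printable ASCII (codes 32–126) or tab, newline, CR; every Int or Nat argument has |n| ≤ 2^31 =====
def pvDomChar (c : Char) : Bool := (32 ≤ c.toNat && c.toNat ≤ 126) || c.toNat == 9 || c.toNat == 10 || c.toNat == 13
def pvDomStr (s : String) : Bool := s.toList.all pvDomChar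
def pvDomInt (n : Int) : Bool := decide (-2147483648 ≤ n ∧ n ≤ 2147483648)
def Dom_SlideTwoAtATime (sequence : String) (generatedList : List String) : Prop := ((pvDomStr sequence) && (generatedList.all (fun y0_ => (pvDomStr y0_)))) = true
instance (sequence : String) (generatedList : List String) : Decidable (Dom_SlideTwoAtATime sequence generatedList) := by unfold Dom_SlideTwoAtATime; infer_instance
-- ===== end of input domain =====

-- B replaces A's per-iteration prefix/suffix re-conversion and three-way branching with one
-- precomputed converted string sliced uniformly (objective: simpler). Both versions append to
-- (mutate) generatedList in Python; the equivalence proved is about the returned value.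


-- ===== PORT A =====
-- chr(n) for 0 ≤ n (exact in chr's valid range; all values here are 96..195)
def pvChr (n : Int) : Char := Char.ofNat n.toNat
-- int(s) on a list of chars; default 0 is unreachable under Pre_ (Python raises ValueError there)
def pvInt (cs : List Char) : Int := (PySem.Int.ofChars? cs).getD 0

-- helper IndividualCharacterCombination, on the char-list view of the string
def IndividualCharacterCombination (cs : List Char) : List Char :=
  cs.foldl (fun word i => word ++ [pvChr (pvInt [i] + 96)]) []

def SlideTwoAtATime (sequence : String) (generatedList : List String) : List String :=
  let s := sequence.toList
  (PySem.List.pyRange 0 ((s.length : Int) - 1) 1).foldl (fun acc i =>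
    if i = 0 then
      acc ++ [String.ofList ([pvChr (pvInt (PySem.List.slice s (some i) (some (i + 2))) + 96)] ++
        IndividualCharacterCombination (PySem.List.slice s (some 2) none))]
    else if i = (s.length : Int) - 2 then
      acc ++ [String.ofList (IndividualCharacterCombination (PySem.List.slice s none (some i)) ++
        [pvChr (pvInt (PySem.List.slice s (some i) (some (i + 2))) + 96)])]
    else
      acc ++ [String.ofList (IndividualCharacterCombination (PySem.List.slice s none (some i)) ++
        [pvChr (pvInt (PySem.List.slice s (some i) (some (i + 2))) + 96)] ++
        IndividualCharacterCombination (PySem.List.slice s (some (i + 2)) none))])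
    generatedList

-- ===== PORT B =====
-- chr(int(c)+96) for one character, the element of B's precomputed table
def pvConv (c : Char) : Char := pvChr (pvInt [c] + 96)

def SlideTwoAtATime_alt (sequence : String) (generatedList : List String) : List String :=
  if sequence.toList.length < 2 then generatedList
  else
    let s := sequence.toList
    let full := s.map pvConv
    (PySem.List.pyRange 0 ((s.length : Int) - 1) 1).foldl (fun acc i =>
      acc ++ [String.ofList (PySem.List.slice full none (some i) ++
        [pvChr (pvInt (PySem.List.slice s (some i) (some (i + 2))) + 96)] ++
        PySem.List.slice full (some (i + 2)) none)])
      generatedList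

-- ===== PRECONDITION & SPEC =====
-- Pre_ excludes exactly the inputs where A raises ValueError: a sequence of length ≥ 2
-- containing a non-digit character (int() is applied to every character there).
def Pre_SlideTwoAtATime (sequence : String) (generatedList : List String) : Prop :=
  sequence.toList.length < 2 ∨ sequence.toList.all Char.isDigit = true
instance (sequence : String) (generatedList : List String) : Decidable (Pre_SlideTwoAtATime sequence generatedList) := by unfold Pre_SlideTwoAtATime; infer_instance
def pvWitness_SlideTwoAtATime : String × List String := ("312", ["x"])

def Spec_SlideTwoAtATime (sequence : String) (generatedList : List String) (out : List String) : Prop := out = SlideTwoAtATime_alt sequence generatedList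
instance (sequence : String) (generatedList : List String) (out : List String) : Decidable (Spec_SlideTwoAtATime sequence generatedList out) := by unfold Spec_SlideTwoAtATime; infer_instance

-- ===== CLAIM (what is proved, stated in full; the proofs are below) =====
def Claim_equal_SlideTwoAtATime : Prop := ∀ (sequence : String) (generatedList : List String), Dom_SlideTwoAtATime sequence generatedList → Pre_SlideTwoAtATime sequence generatedList → Spec_SlideTwoAtATime sequence generatedList (SlideTwoAtATime sequence generatedList)

-- ===== LEMMAS AND PROOFS, then the VERDICT =====

-- A's character-by-character conversion is B's mapped table
theorem ICC_eq_map (cs : List Char) : IndividualCharacterCombination cs = cs.map pvConv := by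
  unfold IndividualCharacterCombination
  rw [PySem.List.foldl_append_singleton_eq_map (fun i => pvChr (pvInt [i] + 96)) cs []]
  rfl

theorem SlideTwoAtATime_spec : Claim_equal_SlideTwoAtATime := by
  intro sequence generatedList _ _
  unfold Spec_SlideTwoAtATime SlideTwoAtATime SlideTwoAtATime_alt
  dsimp only
  by_cases hlen : sequence.toList.length < 2
  · rw [if_pos hlen,
      show PySem.List.pyRange 0 ((sequence.toList.length : Int) - 1) 1 = [] from by
        simp [PySem.List.pyRange, -String.length_toList]; omega]
    rfl
  · rw [if_neg hlen]
    apply PySem.List.foldl_congr_mem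
    intro acc i hi
    rw [PySem.List.mem_pyRange_one] at hi
    obtain ⟨h0, h1⟩ := hi
    have hfrom : PySem.List.slice (sequence.toList.map pvConv) (some (i + 2)) none
        = (sequence.toList.map pvConv).drop (i + 2).toNat :=
      PySem.List.slice_from _ (by omega)
    have hto : PySem.List.slice (sequence.toList.map pvConv) none (some i)
        = (sequence.toList.map pvConv).take i.toNat :=
      PySem.List.slice_to _ h0
    by_cases hi0 : i = 0
    · subst hi0
      rw [if_pos rfl, hto, hfrom, ICC_eq_map,
        PySem.List.slice_from _ (by omega : (0:Int) ≤ 2), List.map_drop]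
      norm_num
    · rw [if_neg hi0]
      by_cases hlast : i = (sequence.toList.length : Int) - 2
      · rw [if_pos hlast, hto, hfrom, ICC_eq_map,
          PySem.List.slice_to _ h0, List.map_take]
        have hdrop : ((sequence.toList.map pvConv).drop (i + 2).toNat) = [] := by
          apply List.drop_eq_nil_of_le
          simp only [List.length_map]
          omega
        rw [hdrop]
        simp
      · rw [if_neg hlast, hto, hfrom, ICC_eq_map, ICC_eq_map,
          PySem.List.slice_to _ h0, PySem.List.slice_from _ (by omega : (0:Int) ≤ i + 2),
          List.map_take, List.map_drop]
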